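-- pv_equiv track=rewrite | github.com/inadk/bci-focus-art | utils/pipeline.py | compute_focus_stats
-- ===== SOURCE A (Python) =====
-- def _runs_of_value(binary, value):
--     """
--     Return list of (start_idx, length) runs where binary==value.
--     Non-overlapping segment indexing.
--     """
--     runs = []
--     start = None
--     for i, b in enumerate(binary):
--         if b == value:
--             if start is None:
--                 start = i
--         else:
--             if start is not None:
--                 runs.append((start, i - start))
--                 start = None
--     if start is not None:
--         runs.append((start, len(binary) - start))
--     return runs
--
-- def compute_focus_stats(binary, window_seconds):
--     """Compute summary stats from a binary focus vector."""
--     n = len(binary)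
--     total_time = n * window_seconds
--     focused_time = sum(binary) * window_seconds
--     unfocused_time = total_time - focused_time
--
--     focused_runs = _runs_of_value(binary, 1)
--     unfocused_runs = _runs_of_value(binary, 0)
--
--     longest_focused_len = max([l for _, l in focused_runs], default=0)
--     longest_unfocused_len = max([l for _, l in unfocused_runs], default=0)
--
--     stats = {
--         "segments": n,
--         "window_seconds": window_seconds,
--         "total_time_seconds": total_time,
--         "focused_time_seconds": focused_time,
--         "unfocused_time_seconds": unfocused_time,
--         "longest_continuous_focused_seconds": longest_focused_len * window_seconds,
--         "longest_continuous_defocused_seconds": longest_unfocused_len * window_seconds,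
--         "number_of_focused_periods": len(focused_runs),
--     }
--     return stats, focused_runs, unfocused_runs
-- ===== SOURCE B (Python) =====
-- from itertools import groupby
--
-- def compute_focus_stats(binary, window_seconds):
--     """Compute summary stats from a binary focus vector (single groupby pass)."""
--     focused_runs = []
--     unfocused_runs = []
--     start = 0
--     for key, grp in groupby(binary):
--         length = sum(1 for _ in grp)
--         if key == 1:
--             focused_runs.append((start, length))
--         elif key == 0:
--             unfocused_runs.append((start, length))
--         start += length
--
--     n = len(binary)
--     total_time = n * window_seconds
--     focused_time = sum(binary) * window_seconds
--     stats = {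
--         "segments": n,
--         "window_seconds": window_seconds,
--         "total_time_seconds": total_time,
--         "focused_time_seconds": focused_time,
--         "unfocused_time_seconds": total_time - focused_time,
--         "longest_continuous_focused_seconds": max((l for _, l in focused_runs), default=0) * window_seconds,
--         "longest_continuous_defocused_seconds": max((l for _, l in unfocused_runs), default=0) * window_seconds,
--         "number_of_focused_periods": len(focused_runs),
--     }
--     return stats, focused_runs, unfocused_runs
-- ===== Notes on version B (the rewrite author's own statement) =====
-- stated objective: idiomatic
-- what changed: Replaces the two separate hand-written state-machine scans (start=None run tracker, called once for 1 and once for 0) by a single itertools.groupby pass that fills both run lists at once while accumulating the start index.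
import Mathlib
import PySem

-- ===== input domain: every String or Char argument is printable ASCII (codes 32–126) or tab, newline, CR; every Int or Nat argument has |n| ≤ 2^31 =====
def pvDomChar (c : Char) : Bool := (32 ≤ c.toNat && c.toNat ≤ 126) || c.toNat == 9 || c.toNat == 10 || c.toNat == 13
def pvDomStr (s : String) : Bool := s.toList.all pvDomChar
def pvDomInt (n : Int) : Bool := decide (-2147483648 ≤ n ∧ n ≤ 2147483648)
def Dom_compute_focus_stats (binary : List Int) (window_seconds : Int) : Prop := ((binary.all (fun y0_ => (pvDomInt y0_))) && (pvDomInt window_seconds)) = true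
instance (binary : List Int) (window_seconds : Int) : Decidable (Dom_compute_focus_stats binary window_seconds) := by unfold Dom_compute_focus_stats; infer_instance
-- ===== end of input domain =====

-- One honest line: B replaces the two hand-written run-scans by one groupby pass filling both lists; objective: idiomatic.

-- ===== PORT A =====
-- _runs_of_value: the enumerate loop with state (start : Option Int) and accumulated runs; i is the enumerate index.
def runsAuxA (binary : List Int) (value : Int) (i : Int) (start : Option Int)
    (runs : List (Int × Int)) : List (Int × Int) :=
  match binary with
  | [] =>
      match start with
      | none => runs
      | some s => runs ++ [(s, i - s)]   -- final flush: len(binary) - start = i - s here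
  | b :: rest =>
      if b = value then
        runsAuxA rest value (i + 1) (match start with | none => some i | some s => some s) runs
      else
        match start with
        | none => runsAuxA rest value (i + 1) none runs
        | some s => runsAuxA rest value (i + 1) none (runs ++ [(s, i - s)])

def runs_of_value (binary : List Int) (value : Int) : List (Int × Int) :=
  runsAuxA binary value 0 none []

-- max([l for _, l in runs], default=0)
def maxLenD (runs : List (Int × Int)) : Int :=
  match PySem.List.max? (runs.map (fun p => p.2)) (fun x => x) with
  | none => 0
  | some m => m

def compute_focus_stats (binary : List Int) (window_seconds : Int) :
    (List (String × Int)) × (List (Int × Int)) × (List (Int × Int)) :=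
  let n : Int := binary.length
  let total_time := n * window_seconds
  let focused_time := binary.sum * window_seconds
  let unfocused_time := total_time - focused_time
  let focused_runs := runs_of_value binary 1
  let unfocused_runs := runs_of_value binary 0
  let longest_focused_len := maxLenD focused_runs
  let longest_unfocused_len := maxLenD unfocused_runs
  let stats : List (String × Int) :=
    [("segments", n),
     ("window_seconds", window_seconds),
     ("total_time_seconds", total_time),
     ("focused_time_seconds", focused_time),
     ("unfocused_time_seconds", unfocused_time),
     ("longest_continuous_focused_seconds", longest_focused_len * window_seconds),
     ("longest_continuous_defocused_seconds", longest_unfocused_len * window_seconds),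
     ("number_of_focused_periods", (focused_runs.length : Int))]
  (stats, focused_runs, unfocused_runs)

-- ===== PORT B =====
-- itertools.groupby(binary): list of (key, group length), maximal runs of equal adjacent values.
def pyGroups (l : List Int) : List (Int × Int) :=
  match l with
  | [] => []
  | x :: xs =>
      (x, 1 + (xs.takeWhile (fun b => b == x)).length) :: pyGroups (xs.dropWhile (fun b => b == x))
termination_by l.length
decreasing_by
  simp only [List.length_cons]
  exact Nat.lt_succ_of_le (List.length_dropWhile_le _ _)

-- the groupby loop: walk the groups once, appending to whichever list the key selects, advancing start.
def buildRuns (gs : List (Int × Int)) (start : Int)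
    (f u : List (Int × Int)) : (List (Int × Int)) × (List (Int × Int)) :=
  match gs with
  | [] => (f, u)
  | (k, len) :: rest =>
      if k = 1 then buildRuns rest (start + len) (f ++ [(start, len)]) u
      else if k = 0 then buildRuns rest (start + len) f (u ++ [(start, len)])
      else buildRuns rest (start + len) f u

def compute_focus_stats_alt (binary : List Int) (window_seconds : Int) :
    (List (String × Int)) × (List (Int × Int)) × (List (Int × Int)) :=
  let (focused_runs, unfocused_runs) := buildRuns (pyGroups binary) 0 [] []
  let n : Int := binary.length
  let total_time := n * window_seconds
  let focused_time := binary.sum * window_seconds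
  let stats : List (String × Int) :=
    [("segments", n),
     ("window_seconds", window_seconds),
     ("total_time_seconds", total_time),
     ("focused_time_seconds", focused_time),
     ("unfocused_time_seconds", total_time - focused_time),
     ("longest_continuous_focused_seconds",
        (match PySem.List.max? (focused_runs.map (fun p => p.2)) (fun x => x) with
         | none => 0 | some m => m) * window_seconds),
     ("longest_continuous_defocused_seconds",
        (match PySem.List.max? (unfocused_runs.map (fun p => p.2)) (fun x => x) with
         | none => 0 | some m => m) * window_seconds),
     ("number_of_focused_periods", (focused_runs.length : Int))]
  (stats, focused_runs, unfocused_runs)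

-- ===== PRECONDITION & SPEC =====
def Spec_compute_focus_stats (binary : List Int) (window_seconds : Int) (out : (List (String × Int)) × (List (Int × Int)) × (List (Int × Int))) : Prop := out = compute_focus_stats_alt binary window_seconds
instance (binary : List Int) (window_seconds : Int) (out : (List (String × Int)) × (List (Int × Int)) × (List (Int × Int))) : Decidable (Spec_compute_focus_stats binary window_seconds out) := by unfold Spec_compute_focus_stats; infer_instance

-- ===== CLAIM (what is proved, stated in full; the proofs are below) =====
def Claim_equal_compute_focus_stats : Prop := ∀ (binary : List Int) (window_seconds : Int), Dom_compute_focus_stats binary window_seconds → Spec_compute_focus_stats binary window_seconds (compute_focus_stats binary window_seconds)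

-- ===== LEMMAS AND PROOFS =====

-- proof helper: the runs with key = v extracted from a group list, with running start
def gRuns (gs : List (Int × Int)) (start : Int) (v : Int) : List (Int × Int) :=
  match gs with
  | [] => []
  | (k, len) :: rest =>
      if k = v then (start, len) :: gRuns rest (start + len) v
      else gRuns rest (start + len) v

theorem buildRuns_eq (gs : List (Int × Int)) (start : Int) (f u : List (Int × Int)) :
    buildRuns gs start f u = (f ++ gRuns gs start 1, u ++ gRuns gs start 0) := by
  induction gs generalizing start f u with
  | nil => simp [buildRuns, gRuns]
  | cons g rest ih =>
      obtain ⟨k, len⟩ := g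
      by_cases h1 : k = 1
      · simp [buildRuns, gRuns, h1, ih]
      · by_cases h0 : k = 0
        · simp [buildRuns, gRuns, h0, ih]
        · simp [buildRuns, gRuns, h1, h0, ih]

-- skipping a block of non-matching values
theorem runsAuxA_skip (l : List Int) (v : Int) (h : ∀ b ∈ l, b ≠ v)
    (rest : List Int) (i : Int) (runs : List (Int × Int)) :
    runsAuxA (l ++ rest) v i none runs = runsAuxA rest v (i + l.length) none runs := by
  induction l generalizing i with
  | nil => simp
  | cons x xs ih =>
      have hx : x ≠ v := h x (by simp)
      simp only [List.cons_append, runsAuxA, if_neg hx]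
      rw [ih (fun b hb => h b (by simp [hb])) (i + 1)]
      congr 1
      simp only [List.length_cons]
      push_cast
      ring

-- scanning a block of matching values keeps the open run
theorem runsAuxA_keep (l : List Int) (v : Int) (h : ∀ b ∈ l, b = v)
    (rest : List Int) (i s : Int) (runs : List (Int × Int)) :
    runsAuxA (l ++ rest) v i (some s) runs = runsAuxA rest v (i + l.length) (some s) runs := by
  induction l generalizing i with
  | nil => simp
  | cons x xs ih =>
      have hx : x = v := h x (by simp)
      simp only [List.cons_append, runsAuxA, if_pos hx]
      rw [ih (fun b hb => h b (by simp [hb])) (i + 1)]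
      congr 1
      simp only [List.length_cons]
      push_cast
      ring

-- at the end of a run (rest empty or first element ≠ v) the open run is flushed
theorem runsAuxA_close (rest : List Int) (v : Int)
    (h : rest = [] ∨ ∃ y t, rest = y :: t ∧ y ≠ v) (j s : Int) (runs : List (Int × Int)) :
    runsAuxA rest v j (some s) runs = runsAuxA rest v j none (runs ++ [(s, j - s)]) := by
  rcases h with h | ⟨y, t, rfl, hy⟩
  · subst h; simp [runsAuxA]
  · simp [runsAuxA, hy]

theorem runsAuxA_groups_aux (n : Nat) : ∀ (binary : List Int), binary.length ≤ n →
    ∀ (v i : Int) (runs : List (Int × Int)),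
    runsAuxA binary v i none runs = runs ++ gRuns (pyGroups binary) i v := by
  induction n with
  | zero =>
      intro binary hb v i runs
      have : binary = [] := List.length_eq_zero_iff.mp (Nat.le_zero.mp hb)
      subst this
      simp [runsAuxA, pyGroups, gRuns]
  | succ n ih =>
      intro binary hb v i runs
      match binary with
      | [] => simp [runsAuxA, pyGroups, gRuns]
      | x :: xs =>
        set pre := xs.takeWhile (fun b => b == x) with hpre
        set rest := xs.dropWhile (fun b => b == x) with hrest
        have hxs : pre ++ rest = xs := List.takeWhile_append_dropWhile
        have hrestlen : rest.length ≤ n := by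
          have h1 : rest.length ≤ xs.length := List.length_dropWhile_le _ _
          have h2 : xs.length + 1 ≤ n + 1 := by simpa using hb
          omega
        have hprev : ∀ b ∈ pre, b = x := by
          intro b hbmem
          rw [hpre] at hbmem
          exact eq_of_beq (List.mem_takeWhile_imp (p := fun b => b == x) (l := xs) hbmem)
        have hrhead : rest = [] ∨ ∃ y t, rest = y :: t ∧ y ≠ x := by
          have hh := List.head?_dropWhile_not (fun b => b == x) xs
          rw [← hrest] at hh
          cases hcase : rest with
          | nil => exact Or.inl rfl
          | cons y t =>
              rw [hcase] at hh
              exact Or.inr ⟨y, t, rfl, by simpa using hh⟩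
        have hgroups : pyGroups (x :: xs) = (x, 1 + (pre.length : Int)) :: pyGroups rest := by
          rw [pyGroups]
        by_cases hv : x = v
        · subst hv
          have step1 : runsAuxA (x :: xs) x i none runs
              = runsAuxA (pre ++ rest) x (i + 1) (some i) runs := by
            conv_lhs => rw [show x :: xs = x :: (pre ++ rest) by rw [hxs]]
            simp [runsAuxA]
          rw [step1, runsAuxA_keep pre x hprev rest (i + 1) i runs,
              runsAuxA_close rest x (by
                rcases hrhead with h | ⟨y, t, hyt, hy⟩
                · exact Or.inl h
                · exact Or.inr ⟨y, t, hyt, hy⟩) _ i runs,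
              ih rest hrestlen x _ _]
          rw [hgroups]
          have e2 : i + 1 + (pre.length : Int) = i + (1 + (pre.length : Int)) := by ring
          simp [gRuns, e2]
        · have hall : ∀ b ∈ x :: pre, b ≠ v := by
            intro b hbmem
            rcases List.mem_cons.mp hbmem with h | h
            · subst h; exact hv
            · rw [hprev b h]; exact hv
          have step1 : runsAuxA (x :: xs) v i none runs
              = runsAuxA rest v (i + (x :: pre).length) none runs := by
            conv_lhs => rw [show x :: xs = (x :: pre) ++ rest by simp [hxs]]
            exact runsAuxA_skip (x :: pre) v hall rest i runs
          rw [step1, ih rest hrestlen v _ _, hgroups]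
          have e3 : i + ((x :: pre).length : Int) = i + (1 + (pre.length : Int)) := by
            simp only [List.length_cons]
            push_cast
            ring
          rw [e3]
          simp only [gRuns, if_neg hv]

theorem runsAuxA_groups (binary : List Int) (v : Int) (i : Int) (runs : List (Int × Int)) :
    runsAuxA binary v i none runs = runs ++ gRuns (pyGroups binary) i v :=
  runsAuxA_groups_aux binary.length binary le_rfl v i runs

-- ===== VERDICT (by name: the statement is the Claim_ definition above) =====
theorem compute_focus_stats_spec : Claim_equal_compute_focus_stats := by
  intro binary window_seconds _
  unfold Spec_compute_focus_stats
  unfold compute_focus_stats compute_focus_stats_alt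
  rw [buildRuns_eq]
  simp only [List.nil_append]
  rw [show runs_of_value binary 1 = gRuns (pyGroups binary) 0 1 from by
        unfold runs_of_value; rw [runsAuxA_groups]; simp,
      show runs_of_value binary 0 = gRuns (pyGroups binary) 0 0 from by
        unfold runs_of_value; rw [runsAuxA_groups]; simp]
  rfl
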